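-- pv_equiv track=rewrite | github.com/Robeenx/New-tasks | randomes/lists/format_range.py | format_range
-- ===== SOURCE A (Python) =====
-- def format_range(arr: list) -> str:
--     """
--     Представление списка чисел в виде диапазона.
--     """
--     p, r, x = float('-inf'), [], 0
--     for i, n in enumerate(arr + ['']):
--         if i and p + 1 != n:
--             if 2 < i - x:
--                 r.append('-'.join(map(str, arr[x:i:i-x-1])))
--             else:
--                 r.extend(map(str, arr[x:i]))
--             x = i
--         p = n
--     return ','.join(r)
-- ===== SOURCE B (Python) =====
-- def format_range(arr: list) -> str:
--     """
--     Представление списка чисел в виде диапазона.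
--     """
--     runs = []  # (start, last) of each maximal run of consecutive integers
--     for v in arr:
--         if runs and runs[-1][1] + 1 == v:
--             runs[-1] = (runs[-1][0], v)
--         else:
--             runs.append((v, v))
--     out = []
--     for a, b in runs:
--         if b - a >= 2:
--             out.append('-'.join((str(a), str(b))))
--         elif b != a:
--             out.extend((str(a), str(b)))
--         else:
--             out.append(str(a))
--     return ','.join(out)
-- ===== Notes on version B (the rewrite author's own statement) =====
-- stated objective: simpler
-- what changed: Replaces A's single sentinel-terminated enumerate loop with float('-inf') seed, index bookkeeping and step-sliced arr[x:i:i-x-1] re-reads by two plain passes: one pass folds the values into (start,last) pairs of maximal consecutive runs, a second pass formats each pair using last-start arithmetic; no sentinel, no indices, no slices.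
import Mathlib
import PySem

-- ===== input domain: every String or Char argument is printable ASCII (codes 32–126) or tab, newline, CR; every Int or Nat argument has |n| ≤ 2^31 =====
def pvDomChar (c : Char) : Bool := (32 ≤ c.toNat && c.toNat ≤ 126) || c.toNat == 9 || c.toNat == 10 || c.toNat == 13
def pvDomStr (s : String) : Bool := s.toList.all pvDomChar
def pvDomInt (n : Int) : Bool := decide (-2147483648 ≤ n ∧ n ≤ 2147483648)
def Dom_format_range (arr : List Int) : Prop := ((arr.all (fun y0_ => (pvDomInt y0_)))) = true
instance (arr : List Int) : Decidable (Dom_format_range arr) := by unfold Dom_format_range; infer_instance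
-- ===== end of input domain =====

-- B replaces A's sentinel/enumerate/step-slice loop by two plain passes (build (start,last) run
-- pairs, then format them); objective: simpler, same O(n) cost.

-- ===== PORT A =====
-- Python's `p + 1 != n`: p = float('-inf') initially and n = '' at the sentinel position both
-- compare unequal to any int+1, so we model those two non-int values as `none` (always-true test).
def pNe (p n : Option Int) : Bool :=
  match p, n with
  | some a, some b => decide (a + 1 ≠ b)
  | _, _ => true

def aStep (arr : List Int) (st : Option Int × List String × Int) (en : Int × Option Int) :
    Option Int × List String × Int :=
  let p := st.1; let r := st.2.1; let x := st.2.2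
  let i := en.1; let n := en.2
  if i ≠ 0 ∧ pNe p n = true then
    let r' :=
      if 2 < i - x then
        -- r.append('-'.join(map(str, arr[x:i:i-x-1]))); the step is ≥ 2 in this branch, so slice? is some
        r ++ [PySem.Str.join "-" (((PySem.List.slice? arr (some x) (some i) (i - x - 1)).getD []).map PySem.Int.toStr)]
      else
        r ++ (PySem.List.slice arr (some x) (some i)).map PySem.Int.toStr
    (n, r', i)
  else (n, r, x)

def format_range (arr : List Int) : String :=
  let st := (PySem.List.enumerate (arr.map some ++ [(none : Option Int)])).foldl (aStep arr) (none, [], 0)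
  PySem.Str.join "," st.2.1

-- ===== PORT B =====
def bStep (runs : List (Int × Int)) (v : Int) : List (Int × Int) :=
  match runs.getLast? with
  | some (a, b) => if b + 1 = v then runs.dropLast ++ [(a, v)] else runs ++ [(v, v)]
  | none => runs ++ [(v, v)]

def bFmt (p : Int × Int) : List String :=
  if 2 ≤ p.2 - p.1 then [PySem.Str.join "-" [PySem.Int.toStr p.1, PySem.Int.toStr p.2]]
  else if p.2 ≠ p.1 then [PySem.Int.toStr p.1, PySem.Int.toStr p.2]
  else [PySem.Int.toStr p.1]

def format_range_alt (arr : List Int) : String :=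
  let runs := arr.foldl bStep []
  let out := runs.foldl (fun acc p => acc ++ bFmt p) []
  PySem.Str.join "," out

-- ===== PRECONDITION & SPEC =====
def Spec_format_range (arr : List Int) (out : String) : Prop := out = format_range_alt arr
instance (arr : List Int) (out : String) : Decidable (Spec_format_range arr out) := by unfold Spec_format_range; infer_instance

-- ===== CLAIM (what is proved, stated in full; the proofs are below) =====
def Claim_equal_format_range : Prop := ∀ (arr : List Int), Dom_format_range arr → Spec_format_range arr (format_range arr)

-- ===== LEMMAS AND PROOFS =====

-- the list of consecutive integers a, a+1, …, b
def conseq (a b : Int) : List Int := (List.range (b + 1 - a).toNat).map (fun (k : Nat) => a + (k : Int))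

lemma conseq_self (a : Int) : conseq a a = [a] := by
  simp [conseq]

lemma conseq_two (a : Int) : conseq a (a + 1) = [a, a + 1] := by
  have h : (a + 1 + 1 - a).toNat = 2 := by omega
  rw [conseq, h]
  simp [List.range_succ]

lemma conseq_snoc (a b : Int) (h : a ≤ b) : conseq a (b + 1) = conseq a b ++ [b + 1] := by
  have h2 : (b + 1 + 1 - a).toNat = (b + 1 - a).toNat + 1 := by omega
  have h3 : a + ((b + 1 - a).toNat : Int) = b + 1 := by omega
  rw [conseq, h2, List.range_succ, List.map_append]
  simp [conseq]
  omega

lemma conseq_getElem? (a b : Int) (h : a ≤ b) (k : Nat) (hk : (k : Int) ≤ b - a) :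
    (conseq a b)[k]? = some (a + k) := by
  have hlen : k < (conseq a b).length := by
    rw [conseq]
    simp
    omega
  rw [List.getElem?_eq_getElem hlen]
  simp [conseq]

-- prefix stability of B's run-building fold
lemma bStep_prefix (l : List Int) : ∀ (done cur : List (Int × Int)), cur ≠ [] →
    List.foldl bStep (done ++ cur) l = done ++ List.foldl bStep cur l := by
  induction l with
  | nil => intro done cur _; simp
  | cons v t ih =>
    intro done cur hc
    obtain ⟨ds, ⟨pa, pb⟩, rfl⟩ := (List.eq_nil_or_concat cur).resolve_left hc
    simp only [List.concat_eq_append] at hc ⊢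
    simp only [List.foldl_cons]
    have h1 : bStep (done ++ (ds ++ [(pa, pb)])) v = done ++ bStep (ds ++ [(pa, pb)]) v := by
      simp only [bStep, ← List.append_assoc, List.getLast?_concat, List.dropLast_concat]
      split_ifs <;> simp
    have h2 : bStep (ds ++ [(pa, pb)]) v ≠ [] := by
      simp only [bStep, List.getLast?_concat]
      split_ifs <;> simp
    rw [h1, ih done _ h2]

-- elements of the run, read back from arr
lemma run_getElem? (arr : List Int) (x i a b : Int)
    (hx : 0 ≤ x) (hab : a ≤ b) (hi : i = x + (b - a) + 1)
    (hrun : PySem.List.slice arr (some x) (some i) = conseq a b) (k : Nat) (hk : (k : Int) ≤ b - a) :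
    arr[x.toNat + k]? = some (a + k) := by
  have h := conseq_getElem? a b hab k hk
  rw [← hrun, PySem.List.slice_toNat arr hx (by omega)] at h
  rw [List.getElem?_take_of_lt (by omega)] at h
  rwa [List.getElem?_drop] at h

-- slice extension: arr[x:i+1] = arr[x:i] ++ [arr[i]]
lemma slice_snoc (arr : List Int) (x i : Int) (t : Int)
    (hx : 0 ≤ x) (hxi : x ≤ i) (hit : arr[i.toNat]? = some t) :
    PySem.List.slice arr (some x) (some (i + 1)) = PySem.List.slice arr (some x) (some i) ++ [t] := by
  have h1 : (i + 1).toNat - x.toNat = (i.toNat - x.toNat) + 1 := by omega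
  rw [PySem.List.slice_toNat arr hx (by omega), PySem.List.slice_toNat arr hx (by omega), h1,
    List.take_succ, List.getElem?_drop]
  have h2 : x.toNat + (i.toNat - x.toNat) = i.toNat := by omega
  rw [h2, hit]
  rfl

-- the stepped slice arr[x:i:i-x-1] picks exactly the first and last element of the run
lemma slice?_first_last (arr : List Int) (x i a b : Int)
    (hx : 0 ≤ x) (hab : 2 ≤ b - a) (hi : i = x + (b - a) + 1) (hil : i ≤ (arr.length : Int))
    (hrun : PySem.List.slice arr (some x) (some i) = conseq a b) :
    PySem.List.slice? arr (some x) (some i) (i - x - 1) = some [a, b] := by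
  subst hi
  have hstep : x + (b - a) + 1 - x - 1 = b - a := by ring
  rw [hstep]
  have hxle : x ≤ (arr.length : Int) := by omega
  simp only [PySem.List.slice?, PySem.List.sliceIndices]
  rw [if_neg (show ¬ (b - a) = 0 by omega)]
  simp only [if_neg (show ¬ (b - a) < 0 by omega), if_neg (show ¬ x < 0 by omega),
    if_neg (show ¬ x + (b - a) + 1 < 0 by omega), min_eq_left hxle, min_eq_left hil,
    if_pos (show 0 < b - a by omega), if_pos (show x < x + (b - a) + 1 by omega)]
  have hnum : x + (b - a) + 1 - x + (b - a) - 1 = 2 * (b - a) := by ring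
  rw [hnum, Int.mul_ediv_cancel 2 (show (b - a) ≠ 0 by omega)]
  have hr2 : ((2 : Int).toNat) = 2 := rfl
  rw [hr2, show List.range 2 = [0, 1] from rfl]
  simp only [List.filterMap_cons, List.filterMap_nil]
  have e0 : (x + (b - a) * ((0 : ℕ) : ℤ)).toNat = x.toNat + 0 := by simp
  have e1 : (x + (b - a) * ((1 : ℕ) : ℤ)).toNat = x.toNat + (b - a).toNat := by
    push_cast
    omega
  rw [e0, e1, run_getElem? arr x (x + (b - a) + 1) a b hx (by omega) rfl hrun 0 (by omega),
    run_getElem? arr x (x + (b - a) + 1) a b hx (by omega) rfl hrun (b - a).toNat (by omega)]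
  simp
  omega

-- A's flush of the run arr[x:i] = [a..b] emits exactly B's formatting of the pair (a,b)
lemma emit_eq (arr : List Int) (x i a b : Int) (r : List String)
    (hx : 0 ≤ x) (hab : a ≤ b) (hi : i = x + (b - a) + 1) (hil : i ≤ (arr.length : Int))
    (hrun : PySem.List.slice arr (some x) (some i) = conseq a b) :
    (if 2 < i - x then
        r ++ [PySem.Str.join "-" (((PySem.List.slice? arr (some x) (some i) (i - x - 1)).getD []).map PySem.Int.toStr)]
      else r ++ (PySem.List.slice arr (some x) (some i)).map PySem.Int.toStr)
      = r ++ bFmt (a, b) := by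
  by_cases h2 : 2 ≤ b - a
  · rw [if_pos (by omega), slice?_first_last arr x i a b hx h2 hi hil hrun]
    simp [bFmt, h2]
  · rw [if_neg (by omega), hrun]
    have hcase : b = a ∨ b = a + 1 := by omega
    rcases hcase with rfl | rfl
    · simp [conseq_self, bFmt]
    · simp [conseq_two, bFmt]

lemma main_loop (tail : List Int) : ∀ (arr : List Int) (x i a b : Int) (r : List String),
    0 ≤ x → a ≤ b → i = x + (b - a) + 1 → i ≤ (arr.length : Int) →
    PySem.List.slice arr (some x) (some i) = conseq a b →
    arr.drop i.toNat = tail →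
    (List.foldl (aStep arr) (some b, r, x)
       (PySem.List.enumerate (tail.map some) i ++ [((arr.length : Int), none)])).2.1
      = r ++ (List.foldl bStep [(a, b)] tail).flatMap bFmt := by
  induction tail with
  | nil =>
    intro arr x i a b r hx hab hi hil hrun hdrop
    have hiL : i = (arr.length : Int) := by
      have := congrArg List.length hdrop
      simp [List.length_drop] at this
      omega
    simp only [List.map_nil, PySem.List.enumerate_nil, List.nil_append, List.foldl_cons,
      List.foldl_nil]
    rw [← hiL]
    have hcond : (i ≠ 0 ∧ pNe (some b) none = true) := ⟨by omega, rfl⟩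
    simp only [aStep]
    rw [if_pos hcond, emit_eq arr x i a b r hx hab hi hil hrun]
    simp
  | cons t ts ih =>
    intro arr x i a b r hx hab hi hil hrun hdrop
    have h0i : (0 : Int) ≤ i := by omega
    have hit : arr[i.toNat]? = some t := by
      rw [← List.head?_drop, hdrop]
      rfl
    have hlen : i.toNat < arr.length := by
      have := congrArg List.length hdrop
      simp [List.length_drop] at this
      omega
    have hdrop' : arr.drop (i + 1).toNat = ts := by
      have h1 : (i + 1).toNat = i.toNat + 1 := by omega
      have h2 : arr.drop (i.toNat + 1) = (arr.drop i.toNat).drop 1 := by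
        rw [List.drop_drop]
      rw [h1, h2, hdrop]
      rfl
    rw [List.map_cons, PySem.List.enumerate_cons, List.cons_append, List.foldl_cons]
    by_cases hbt : b + 1 = t
    · have hstep : aStep arr (some b, r, x) (i, some t) = (some t, r, x) := by
        simp [aStep, pNe, hbt]
      rw [hstep]
      have hsl : PySem.List.slice arr (some x) (some (i + 1)) = conseq a t := by
        rw [slice_snoc arr x i t hx (by omega) hit, hrun, ← hbt, conseq_snoc a b hab]
      rw [ih arr x (i + 1) a t r hx (by omega) (by omega) (by omega) hsl hdrop']
      have hb1 : bStep [(a, b)] t = [(a, t)] := by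
        simp [bStep, hbt]
      rw [List.foldl_cons, hb1]
    · have hstep : aStep arr (some b, r, x) (i, some t) = (some t, r ++ bFmt (a, b), i) := by
        have hcond : (i ≠ 0 ∧ pNe (some b) (some t) = true) := by
          refine ⟨by omega, ?_⟩
          simp [pNe, hbt]
        simp only [aStep, if_pos hcond]
        rw [emit_eq arr x i a b r hx hab hi hil hrun]
      rw [hstep]
      have hsl1 : PySem.List.slice arr (some i) (some (i + 1)) = conseq t t := by
        rw [slice_snoc arr i i t h0i le_rfl hit, conseq_self]
        rw [PySem.List.slice_toNat arr h0i h0i]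
        simp
      rw [ih arr i (i + 1) t t (r ++ bFmt (a, b)) h0i le_rfl (by omega) (by omega) hsl1 hdrop']
      have hb2 : bStep [(a, b)] t = [(a, b)] ++ [(t, t)] := by
        simp [bStep, hbt]
      rw [List.foldl_cons, hb2, bStep_prefix ts [(a, b)] [(t, t)] (by simp)]
      simp

theorem format_range_eq (arr : List Int) : format_range arr = format_range_alt arr := by
  cases arr with
  | nil => rfl
  | cons h ts =>
    unfold format_range format_range_alt
    simp only [List.map_cons, List.cons_append, PySem.List.enumerate_cons, List.foldl_cons]
    have h1 : aStep (h :: ts) (none, [], 0) (0, some h) = (some h, [], 0) := by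
      simp [aStep]
    rw [h1, PySem.List.enumerate_append]
    have h2 : (0 : Int) + 1 + ((ts.map some).length : Int) = (((h :: ts).length : Int)) := by
      simp
      omega
    rw [h2]
    have h3 : PySem.List.enumerate [(none : Option Int)] ((h :: ts).length : Int)
        = [(((h :: ts).length : Int), (none : Option Int))] := by
      simp [PySem.List.enumerate_cons, PySem.List.enumerate_nil]
    rw [h3]
    simp only [zero_add]
    have hsl : PySem.List.slice (h :: ts) (some (0 : Int)) (some (0 + (h - h) + 1)) = conseq h h := by
      rw [conseq_self, PySem.List.slice_toNat _ le_rfl (by omega)]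
      simp
    rw [main_loop ts (h :: ts) 0 1 h h [] le_rfl le_rfl (by omega)
      (by push_cast [List.length_cons]; omega) (by simpa using hsl) (by simp)]
    have h4 : bStep [] h = [(h, h)] := by simp [bStep]
    rw [h4, PySem.List.foldl_append_eq_flatMap]

-- ===== VERDICT (by name: the statement is the Claim_ definition above) =====
theorem format_range_spec : Claim_equal_format_range := by
  intro arr _
  unfold Spec_format_range
  exact format_range_eq arr
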